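-- pv_equiv track=rewrite | github.com/PlasmaHH/vdb | vdb/track.py | unpack_prepare
-- ===== SOURCE A (Python) =====
-- def unpack_prepare( fmt ):
--     fullspec = "="
--     names = []
--     fields = fmt.split(",")
--     for f in fields:
--         name,spec = f.split(":")
--         fullspec += spec
--         if( len(name) > 0 ):
--             names.append(name)
--     return (names,fullspec)
-- ===== SOURCE B (Python) =====
-- def unpack_prepare( fmt ):
--     # single left-to-right character scan (state machine), no str.split at all
--     names = []
--     spec_parts = ["="]
--     name_buf = ""
--     spec_buf = ""
--     colons = 0
--     for ch in fmt + ",":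
--         if ch == ",":
--             if colons != 1:
--                 raise ValueError("field must be of the form name:spec")
--             spec_parts.append(spec_buf)
--             if name_buf:
--                 names.append(name_buf)
--             name_buf = ""
--             spec_buf = ""
--             colons = 0
--         elif ch == ":":
--             colons += 1
--         elif colons:
--             spec_buf += ch
--         else:
--             name_buf += ch
--     return (names, "".join(spec_parts))
-- ===== Notes on version B (the rewrite author's own statement) =====
-- stated objective: alternative
-- what changed: Replaces A's split-on-comma then split-on-colon per-field processing by a single left-to-right character scan: a state machine with name/spec buffers and a colon counter that finalizes each field at ',' (raising the same ValueError on a field without exactly one colon), with no str.split call at all.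
import Mathlib
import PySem

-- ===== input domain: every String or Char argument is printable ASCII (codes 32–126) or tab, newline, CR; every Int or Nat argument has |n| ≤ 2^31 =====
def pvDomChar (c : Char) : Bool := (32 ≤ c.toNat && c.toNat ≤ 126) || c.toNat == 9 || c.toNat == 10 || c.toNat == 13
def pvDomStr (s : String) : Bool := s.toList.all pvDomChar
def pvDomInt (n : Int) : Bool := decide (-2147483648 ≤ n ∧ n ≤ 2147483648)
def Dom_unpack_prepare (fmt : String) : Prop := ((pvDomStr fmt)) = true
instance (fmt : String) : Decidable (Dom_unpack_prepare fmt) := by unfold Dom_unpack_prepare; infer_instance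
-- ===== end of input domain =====

-- B replaces A's split-on-comma/split-on-colon processing by a single character-scan state machine (alternative algorithm).


-- ===== PORT A =====
-- one loop step of A: 'name,spec = f.split(":"); fullspec += spec; if len(name) > 0: names.append(name)'
-- (the non-2-part match arm is where Python raises ValueError; those inputs are excluded by Pre_)
def pvStepA (st : List Char × List (List Char)) (f : List Char) : List Char × List (List Char) :=
  match PySem.Chars.splitOn f [':'] with
  | [name, spec] => (st.1 ++ spec, if name.length > 0 then st.2 ++ [name] else st.2)
  | _ => st

def unpack_prepare (fmt : String) : List String × String :=
  let fields := PySem.Chars.splitOn fmt.toList [',']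
  let st := fields.foldl pvStepA (['='], [])
  (st.2.map String.ofList, String.ofList st.1)

-- ===== PORT B =====
-- the scan state: (names, spec_parts, name_buf, spec_buf, colons) of Source B
structure PvScanSt where
  names : List (List Char)
  specParts : List (List Char)
  nameBuf : List Char
  specBuf : List Char
  colons : Nat
deriving Repr, DecidableEq

-- one character of Source B's loop body; in the ',' arm Source B first raises ValueError
-- when colons ≠ 1 (a malformed field) — those inputs are excluded by Pre_, so the
-- port has no value to produce there and simply finalizes the field
def pvStepB (st : PvScanSt) (ch : Char) : PvScanSt :=
  if ch = ',' then
    { names := if st.nameBuf.length > 0 then st.names ++ [st.nameBuf] else st.names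
      specParts := st.specParts ++ [st.specBuf]
      nameBuf := [], specBuf := [], colons := 0 }
  else if ch = ':' then { st with colons := st.colons + 1 }
  else if st.colons ≠ 0 then { st with specBuf := st.specBuf ++ [ch] }
  else { st with nameBuf := st.nameBuf ++ [ch] }

def unpack_prepare_alt (fmt : String) : List String × String :=
  let fin := (fmt.toList ++ [',']).foldl pvStepB ⟨[], [['=']], [], [], 0⟩
  (fin.names.map String.ofList, String.ofList (PySem.Chars.join [] fin.specParts))

-- ===== PRECONDITION & SPEC =====
-- Pre_ excludes exactly the inputs on which A raises ValueError (a comma-separated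
-- field whose split on ':' does not have exactly two parts); B raises there too.
def Pre_unpack_prepare (fmt : String) : Prop :=
  ∀ f ∈ PySem.Chars.splitOn fmt.toList [','], (PySem.Chars.splitOn f [':']).length = 2
instance (fmt : String) : Decidable (Pre_unpack_prepare fmt) := by unfold Pre_unpack_prepare; infer_instance
def pvWitness_unpack_prepare : String := "a:i,:x,b:h"

def Spec_unpack_prepare (fmt : String) (out : List String × String) : Prop := out = unpack_prepare_alt fmt
instance (fmt : String) (out : List String × String) : Decidable (Spec_unpack_prepare fmt out) := by unfold Spec_unpack_prepare; infer_instance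

-- ===== CLAIM (what is proved, stated in full; the proofs are below) =====
def Claim_equal_unpack_prepare : Prop := ∀ (fmt : String), Dom_unpack_prepare fmt → Pre_unpack_prepare fmt → Spec_unpack_prepare fmt (unpack_prepare fmt)

-- ===== LEMMAS AND PROOFS =====

-- recursive characterisation of single-char splitOn, used to relate both ports
def pySplitGo (c : Char) (pre : List Char) : List Char → List (List Char)
  | [] => [pre]
  | a :: t => if a = c then pre :: pySplitGo c [] t else pySplitGo c (pre ++ [a]) t

theorem pvGo_spec (c : Char) (fuel : Nat) (l cur : List Char) (acc : List (List Char))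
    (h : l.length < fuel) :
    PySem.Chars.splitOn.go [c] fuel l cur acc = acc.reverse ++ pySplitGo c cur.reverse l := by
  induction fuel generalizing l cur acc with
  | zero => omega
  | succ n ih =>
    cases l with
    | nil => simp [PySem.Chars.splitOn.go, pySplitGo]
    | cons a t =>
      by_cases hc : a = c
      · subst hc
        simp only [PySem.Chars.splitOn.go, List.isPrefixOf, BEq.rfl, Bool.true_and,
          if_true, List.length_cons, List.length_nil, List.drop_succ_cons, List.drop_zero]
        rw [ih t [] (cur.reverse :: acc) (by simp at h ⊢; omega)]
        simp [pySplitGo]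
      · have : ([c].isPrefixOf (a :: t)) = false := by
          simp [List.isPrefixOf]; exact fun h' => absurd h'.symm hc
        simp only [PySem.Chars.splitOn.go, this, if_false, Bool.false_eq_true]
        rw [ih t (a :: cur) acc (by simp at h ⊢; omega)]
        simp [pySplitGo, hc]

theorem pvSplitOn_single (c : Char) (l : List Char) :
    PySem.Chars.splitOn l [c] = pySplitGo c [] l := by
  have := pvGo_spec c (l.length + 1) l [] [] (by omega)
  simpa [PySem.Chars.splitOn] using this

-- a colon-free split yields exactly one part
theorem pvSplit_ne_nil (c : Char) (pre t : List Char) : pySplitGo c pre t ≠ [] := by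
  induction t generalizing pre with
  | nil => simp [pySplitGo]
  | cons a t ih => by_cases hc : a = c <;> simp [pySplitGo, hc, ih]

theorem pvSplit_singleton (c : Char) (t : List Char) (pre x : List Char)
    (h : pySplitGo c pre t = [x]) : x = pre ++ t ∧ c ∉ t := by
  induction t generalizing pre with
  | nil => simp [pySplitGo] at h; simp [h.symm]
  | cons a t ih =>
    by_cases hc : a = c
    · rw [show pySplitGo c pre (a :: t) = pre :: pySplitGo c [] t by
        simp [pySplitGo, hc]] at h
      simp at h
      exact absurd h.2 (pvSplit_ne_nil c [] t)
    · simp only [pySplitGo, hc, if_false] at h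
      obtain ⟨hx, hm⟩ := ih _ h
      exact ⟨by simp [hx], by simp [List.mem_cons]; exact ⟨fun h' => hc h'.symm, hm⟩⟩

-- the split parts, each re-suffixed with the separator, concatenate back to the input
theorem pvSplit_join (c : Char) (t pre : List Char) :
    ((pySplitGo c pre t).map (· ++ [c])).flatten = pre ++ t ++ [c] := by
  induction t generalizing pre with
  | nil => simp [pySplitGo]
  | cons a t ih =>
    by_cases hc : a = c
    · subst hc; simp [pySplitGo, ih]
    · simp [pySplitGo, hc, ih (pre ++ [a])]

-- no part of the split contains the separator
theorem pvSplit_no_mem (c : Char) (t pre : List Char) (hp : c ∉ pre) :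
    ∀ f ∈ pySplitGo c pre t, c ∉ f := by
  induction t generalizing pre with
  | nil => simpa [pySplitGo] using hp
  | cons a t ih =>
    by_cases hc : a = c
    · subst hc
      simp only [pySplitGo, if_true]
      intro f hf
      rcases List.mem_cons.mp hf with h | h
      · exact h ▸ hp
      · exact ih [] (by simp) f h
    · simp only [pySplitGo, hc, if_false]
      exact ih (pre ++ [a]) (by simp [hp]; exact fun h => hc h.symm)

-- scanning separator-free characters in spec mode appends them to the spec buffer
theorem pvScanSpec (t : List Char) (h1 : (',':Char) ∉ t) (h2 : (':':Char) ∉ t)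
    (ns sp : List (List Char)) (nb sb : List Char) (k : Nat) (hk : k ≠ 0) :
    t.foldl pvStepB ⟨ns, sp, nb, sb, k⟩ = ⟨ns, sp, nb, sb ++ t, k⟩ := by
  induction t generalizing sb with
  | nil => simp
  | cons a t ih =>
    have ha1 : a ≠ ',' := fun h => h1 (h ▸ List.mem_cons_self)
    have ha2 : a ≠ ':' := fun h => h2 (h ▸ List.mem_cons_self)
    simp only [List.foldl_cons, pvStepB, ha1, ha2, if_false, if_pos hk]
    rw [ih (fun h => h1 (List.mem_cons_of_mem _ h)) (fun h => h2 (List.mem_cons_of_mem _ h))]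
    simp

-- scanning one well-formed field followed by ',' finalizes it
theorem pvFieldScan (f : List Char) (hf : (',':Char) ∉ f)
    (name spec : List Char) (ns sp : List (List Char)) (nb : List Char)
    (h : pySplitGo ':' nb f = [name, spec]) :
    (f ++ [',']).foldl pvStepB ⟨ns, sp, nb, [], 0⟩ =
      ⟨ns ++ (if name.length > 0 then [name] else []), sp ++ [spec], [], [], 0⟩ := by
  induction f generalizing nb with
  | nil => simp [pySplitGo] at h
  | cons a t ih =>
    have ha1 : a ≠ ',' := fun h' => hf (h' ▸ List.mem_cons_self)
    have ht : (',':Char) ∉ t := fun h' => hf (List.mem_cons_of_mem _ h')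
    by_cases hc : a = ':'
    · subst hc
      simp only [pySplitGo, if_true] at h
      simp only [List.cons.injEq] at h
      obtain ⟨hnb, hrest⟩ := h
      obtain ⟨hspec, hnocolon⟩ := pvSplit_singleton ':' t [] spec hrest
      simp only [List.nil_append] at hspec
      simp only [List.cons_append, List.foldl_cons]
      rw [show pvStepB ⟨ns, sp, nb, [], 0⟩ ':' =
            (⟨ns, sp, nb, [], 1⟩ : PvScanSt) from by simp [pvStepB]]
      rw [List.foldl_append, pvScanSpec t ht hnocolon ns sp nb [] 1 (by omega)]
      rw [show List.foldl pvStepB (⟨ns, sp, nb, [] ++ t, 1⟩ : PvScanSt) [','] =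
            (⟨if nb.length > 0 then ns ++ [nb] else ns, sp ++ [t], [], [], 0⟩ : PvScanSt)
          from by simp [pvStepB]]
      rw [hnb, hspec]
      split_ifs <;> simp_all
    · simp only [pySplitGo, hc, if_false] at h
      simp only [List.cons_append, List.foldl_cons, pvStepB, ha1, hc, if_false]
      simpa using ih ht (nb ++ [a]) h

def pvNameOf (f : List Char) : Option (List Char) :=
  match pySplitGo ':' [] f with
  | [n, _] => if n.length > 0 then some n else none
  | _ => none

def pvSpecOf (f : List Char) : List Char :=
  match pySplitGo ':' [] f with
  | [_, s] => s
  | _ => []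

-- B's scan over the re-concatenated fields equals the per-field summary
theorem pvFieldsScan (fields : List (List Char))
    (h : ∀ f ∈ fields, (',':Char) ∉ f ∧ (pySplitGo ':' [] f).length = 2)
    (ns sp : List (List Char)) :
    ((fields.map (· ++ [','])).flatten).foldl pvStepB ⟨ns, sp, [], [], 0⟩ =
      ⟨ns ++ fields.filterMap pvNameOf, sp ++ fields.map pvSpecOf, [], [], 0⟩ := by
  induction fields generalizing ns sp with
  | nil => simp
  | cons f rest ih =>
    obtain ⟨hf, hlen⟩ := h f (by simp)
    obtain ⟨name, spec, hsplit⟩ :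
        ∃ name spec, pySplitGo ':' [] f = [name, spec] := by
      rcases e : pySplitGo ':' [] f with _ | ⟨a, _ | ⟨b, _ | _⟩⟩ <;> simp [e] at hlen ⊢
    simp only [List.map_cons, List.flatten_cons]
    rw [List.foldl_append, pvFieldScan f hf name spec ns sp [] hsplit]
    rw [ih (fun g hg => h g (by simp [hg]))]
    simp [pvNameOf, pvSpecOf, hsplit, List.filterMap_cons]
    by_cases hn : name.length > 0 <;> simp [hn]

-- A's fold, started from any accumulator, equals the same per-field summary
theorem pvFoldA_eq (fields : List (List Char))
    (h : ∀ f ∈ fields, (pySplitGo ':' [] f).length = 2)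
    (acc1 : List Char) (acc2 : List (List Char)) :
    fields.foldl pvStepA (acc1, acc2)
    = (acc1 ++ (fields.map pvSpecOf).flatten, acc2 ++ fields.filterMap pvNameOf) := by
  induction fields generalizing acc1 acc2 with
  | nil => simp
  | cons f rest ih =>
    have hf := h f (by simp)
    obtain ⟨name, spec, hsplit⟩ :
        ∃ name spec, pySplitGo ':' [] f = [name, spec] := by
      rcases e : pySplitGo ':' [] f with _ | ⟨a, _ | ⟨b, _ | _⟩⟩ <;> simp [e] at hf ⊢
    have hrest : ∀ g ∈ rest, (pySplitGo ':' [] g).length = 2 :=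
      fun g hg => h g (by simp [hg])
    simp only [List.foldl_cons, List.map_cons, List.filterMap_cons, pvStepA,
      pvSplitOn_single, hsplit]
    rw [ih hrest]
    by_cases hn : name.length > 0 <;>
      simp [hn, pvNameOf, pvSpecOf, hsplit]

theorem pvJoin_nil_flatten (l : List (List Char)) :
    PySem.Chars.join [] l = l.flatten := by
  induction l with
  | nil => simp [PySem.Chars.join_nil]
  | cons p rest ih =>
    cases rest with
    | nil => simp [PySem.Chars.join_singleton]
    | cons q r => simp [PySem.Chars.join_cons_cons, ih]

-- ===== VERDICT (by name: the statement is the Claim_ definition above) =====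
theorem unpack_prepare_spec : Claim_equal_unpack_prepare := by
  intro fmt _ hpre
  unfold Pre_unpack_prepare at hpre
  unfold Spec_unpack_prepare unpack_prepare unpack_prepare_alt
  simp only [pvSplitOn_single] at hpre ⊢
  have hfields : ∀ f ∈ pySplitGo ',' [] fmt.toList,
      (',':Char) ∉ f ∧ (pySplitGo ':' [] f).length = 2 := by
    intro f hf
    exact ⟨pvSplit_no_mem ',' fmt.toList [] (by simp) f hf,
      by simpa [pvSplitOn_single] using hpre f hf⟩
  have hchars : fmt.toList ++ [','] =
      (((pySplitGo ',' [] fmt.toList).map (· ++ [','])).flatten) := by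
    simpa using (pvSplit_join ',' fmt.toList []).symm
  rw [pvFoldA_eq _ (fun f hf => (hfields f hf).2), hchars,
     pvFieldsScan _ hfields [] [['=']]]
  simp [pvJoin_nil_flatten]
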